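-- pv_equiv track=rewrite | github.com/will-mcintyre04/volleyball-stats | VolleyballStats.py | determinevalues
-- ===== SOURCE A (Python) =====
-- def determinevalues(userinput):
--     positive = 0
--     negative = 0
--     continuous = 0
--     total = 0
--     for i in range(0, len(userinput)):
--         if userinput[i].upper() == "K" or userinput[i].upper() == "A":
--             positive = positive + 1
--             total = total + 1
--         elif userinput[i].upper() == "E":
--             negative = negative + 1
--             total = total + 1
--         elif userinput[i].upper() == "C":
--             continuous = continuous + 1
--             total = total + 1
--     return positive, negative, total, continuous
-- ===== SOURCE B (Python) =====
-- def determinevalues(userinput):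
--     cnt = {}
--     for ch in userinput.upper():
--         cnt[ch] = cnt.get(ch, 0) + 1
--     positive = cnt.get('K', 0) + cnt.get('A', 0)
--     negative = cnt.get('E', 0)
--     continuous = cnt.get('C', 0)
--     return positive, negative, positive + negative + continuous, continuous
-- ===== Notes on version B (the rewrite author's own statement) =====
-- stated objective: faster
-- what changed: Replaces the per-index branching scan with four running counters by building a character frequency table of userinput.upper() in one pass and deriving positive/negative/continuous/total from keyed lookups.
import Mathlib
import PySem

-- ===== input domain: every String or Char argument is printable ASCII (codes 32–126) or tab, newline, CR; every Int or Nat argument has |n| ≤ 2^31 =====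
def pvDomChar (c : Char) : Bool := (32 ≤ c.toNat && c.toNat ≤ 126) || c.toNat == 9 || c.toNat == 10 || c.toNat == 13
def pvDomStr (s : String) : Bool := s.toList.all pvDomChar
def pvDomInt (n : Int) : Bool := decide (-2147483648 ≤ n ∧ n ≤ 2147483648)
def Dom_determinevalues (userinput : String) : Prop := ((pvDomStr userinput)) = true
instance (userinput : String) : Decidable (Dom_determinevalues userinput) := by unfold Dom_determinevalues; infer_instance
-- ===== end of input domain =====

-- B replaces A's branching index loop over four counters by a frequency table of the
-- uppercased string plus keyed lookups (measured faster in a timing run; same O(n)).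

-- ===== PORT A =====
-- A's loop body as a named helper (the if/elif chain on userinput[i].upper())
def pvStepA (st : Int × Int × Int × Int) (c : Char) : Int × Int × Int × Int :=
  let ch := PySem.Chars.upper [c]
  if ch = ['K'] ∨ ch = ['A'] then (st.1 + 1, st.2.1, st.2.2.1, st.2.2.2 + 1)
  else if ch = ['E'] then (st.1, st.2.1 + 1, st.2.2.1, st.2.2.2 + 1)
  else if ch = ['C'] then (st.1, st.2.1, st.2.2.1 + 1, st.2.2.2 + 1)
  else st

-- literal port of A: index loop over range(0, len(userinput)), four running counters,
-- branch on userinput[i].upper()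
def determinevalues (userinput : String) : Int × Int × Int × Int :=
  let cs := userinput.toList
  let st :=
    (PySem.List.pyRange 0 (PySem.Str.len userinput) 1).foldl
      (fun st i => pvStepA st (PySem.List.pyGetD cs i ' '))
      (0, 0, 0, 0)
  (st.1, st.2.1, st.2.2.2, st.2.2.1)

-- ===== PORT B =====
-- port of B: build counts of the characters of userinput.upper(), then keyed lookups
def determinevalues_alt (userinput : String) : Int × Int × Int × Int :=
  let u := (PySem.Str.upper userinput).toList
  let cnt := u.foldl (fun (d : PySem.Dict Char Int) ch => d.insert ch (d.getD ch 0 + 1)) PySem.Dict.empty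
  let positive := cnt.getD 'K' 0 + cnt.getD 'A' 0
  let negative := cnt.getD 'E' 0
  let continuous := cnt.getD 'C' 0
  (positive, negative, positive + negative + continuous, continuous)

-- ===== PRECONDITION & SPEC =====
def Spec_determinevalues (userinput : String) (out : Int × Int × Int × Int) : Prop := out = determinevalues_alt userinput
instance (userinput : String) (out : Int × Int × Int × Int) : Decidable (Spec_determinevalues userinput out) := by unfold Spec_determinevalues; infer_instance

-- ===== CLAIM (what is proved, stated in full; the proofs are below) =====
def Claim_equal_determinevalues : Prop := ∀ (userinput : String), Dom_determinevalues userinput → Spec_determinevalues userinput (determinevalues userinput)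

-- ===== LEMMAS AND PROOFS =====

-- invariant of A's loop: the four counters count the uppercased characters
theorem pvloopA (cs : List Char) : ∀ (p n c t : Int),
    cs.foldl pvStepA (p, n, c, t) =
      (p + ((cs.map PySem.Chars.upperChar).count 'K' + (cs.map PySem.Chars.upperChar).count 'A' : Int),
       n + ((cs.map PySem.Chars.upperChar).count 'E' : Int),
       c + ((cs.map PySem.Chars.upperChar).count 'C' : Int),
       t + ((cs.map PySem.Chars.upperChar).count 'K' + (cs.map PySem.Chars.upperChar).count 'A'
            + (cs.map PySem.Chars.upperChar).count 'E' + (cs.map PySem.Chars.upperChar).count 'C' : Int)) := by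
  induction cs with
  | nil => intro p n c t; simp
  | cons x cs ih =>
    intro p n c t
    have hup : PySem.Chars.upper [x] = [PySem.Chars.upperChar x] := rfl
    simp only [List.foldl_cons, List.map_cons, List.count_cons]
    by_cases hK : PySem.Chars.upperChar x = 'K'
    · simp [pvStepA, hup, hK, ih]; constructor <;> ring_nf
    · by_cases hA : PySem.Chars.upperChar x = 'A'
      · simp [pvStepA, hup, hA, ih]; constructor <;> ring_nf
      · by_cases hE : PySem.Chars.upperChar x = 'E'
        · simp [pvStepA, hup, hE, ih]; constructor <;> ring_nf
        · by_cases hC : PySem.Chars.upperChar x = 'C'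
          · simp [pvStepA, hup, hC, ih]; constructor <;> ring_nf
          · simp [pvStepA, hup, hK, hA, hE, hC, ih]

-- ===== VERDICT (by name: the statement is the Claim_ definition above) =====
theorem determinevalues_spec : Claim_equal_determinevalues := by
  intro s _
  unfold Spec_determinevalues determinevalues determinevalues_alt
  simp only [PySem.Str.len_eq]
  rw [PySem.List.foldl_pyRange_zero_pyGetD' s.toList ' ' pvStepA (0, 0, 0, 0)]
  rw [pvloopA]
  simp only [PySem.Dict.getD_foldl_insert_add_one, PySem.Dict.getD_empty, PySem.Str.toList_upper,
    show ∀ cs, PySem.Chars.upper cs = cs.map PySem.Chars.upperChar from fun _ => rfl]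
  ring_nf
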